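-- pv_equiv track=rewrite | github.com/pnutnam/outreach_orchestrator | modules/context_builder.py | _aggregate_socials
-- ===== SOURCE A (Python) =====
-- def _aggregate_socials(website_socials, company_linkedin, personnel, maps_socials):
--     """
--     Combines all validated social profiles from Website, LinkedIn, and Maps.
--     Dedupes by normalizing URL (ignoring protocol/www).
--     """
--     raw_list = []
--     if website_socials: raw_list.extend(website_socials)
--     if maps_socials: raw_list.extend(maps_socials)
--     if company_linkedin: raw_list.append(company_linkedin)
--     for p in personnel:
--         if p.get("profile_url"):
--             raw_list.append(p.get("profile_url"))
--
--     # Dedupe logic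
--     unique_map = {}
--
--     for url in raw_list:
--         if not url: continue
--
--         # Normalize Key: remove http/s, www, trailing slash
--         clean_key = url.lower().replace("https://", "").replace("http://", "").replace("www.", "").rstrip("/")
--
--         # Selection Logic: Prefer HTTPS, then shorter (usually cleaner)
--         if clean_key not in unique_map:
--             unique_map[clean_key] = url
--         else:
--             current = unique_map[clean_key]
--             # If new one is https and current isn't, take new one
--             if "https" in url and "https" not in current:
--                 unique_map[clean_key] = url
--             # If both/neither https, maybe prefer www? or length?
--             # Let's just stick with first found unless https upgrade.
--
--
--     return sorted(list(unique_map.values()))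
-- ===== SOURCE B (Python) =====
-- def _aggregate_socials(website_socials, company_linkedin, personnel, maps_socials):
--     raw_list = []
--     if website_socials: raw_list.extend(website_socials)
--     if maps_socials: raw_list.extend(maps_socials)
--     if company_linkedin: raw_list.append(company_linkedin)
--     for p in personnel:
--         if p.get("profile_url"):
--             raw_list.append(p.get("profile_url"))
--
--     # Group every URL under its normalized key, then pick per group the
--     # first URL containing "https", else the group's first URL.
--     groups = {}
--     for url in raw_list:
--         if not url:
--             continue
--         key = url.lower().replace("https://", "").replace("http://", "").replace("www.", "").rstrip("/")
--         groups.setdefault(key, []).append(url)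
--
--     chosen = [next((u for u in g if "https" in u), g[0]) for g in groups.values()]
--     return sorted(chosen)
-- ===== Notes on version B (the rewrite author's own statement) =====
-- stated objective: alternative
-- what changed: Replaces A's inline keep-first-unless-https-upgrade dict update with a two-phase approach: group all URLs by normalized key via setdefault/append, then select per group the first URL containing 'https' (else the group's first URL) and sort.
import Mathlib
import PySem

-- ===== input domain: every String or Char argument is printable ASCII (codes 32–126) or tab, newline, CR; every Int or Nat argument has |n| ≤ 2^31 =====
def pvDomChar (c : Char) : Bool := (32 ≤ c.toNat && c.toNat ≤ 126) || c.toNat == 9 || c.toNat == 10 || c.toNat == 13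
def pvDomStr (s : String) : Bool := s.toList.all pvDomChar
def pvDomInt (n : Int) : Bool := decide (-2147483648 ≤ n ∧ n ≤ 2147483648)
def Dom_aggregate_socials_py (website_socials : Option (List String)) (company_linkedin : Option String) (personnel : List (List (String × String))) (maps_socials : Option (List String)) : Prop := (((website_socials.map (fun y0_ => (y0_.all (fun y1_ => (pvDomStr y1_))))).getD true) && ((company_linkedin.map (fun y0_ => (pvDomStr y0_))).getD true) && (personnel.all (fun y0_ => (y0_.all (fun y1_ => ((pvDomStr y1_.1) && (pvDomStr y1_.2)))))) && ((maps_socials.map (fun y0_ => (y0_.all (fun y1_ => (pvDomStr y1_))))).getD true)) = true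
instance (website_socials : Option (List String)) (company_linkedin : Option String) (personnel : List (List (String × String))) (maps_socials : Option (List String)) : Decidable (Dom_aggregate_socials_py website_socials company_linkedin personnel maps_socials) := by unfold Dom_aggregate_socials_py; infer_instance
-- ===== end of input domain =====

-- B re-implements A's inline keep-first-unless-https-upgrade dict update as a two-phase
-- group-by-key / select-per-group pass (objective: alternative decomposition, same cost).

-- ===== PORT A =====
-- shared helper: the raw_list collection lines are textually identical in A and in B
def pvRawList (website_socials : Option (List String)) (company_linkedin : Option String)
    (personnel : List (List (String × String))) (maps_socials : Option (List String)) : List String :=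
  let r : List String := []
  let r := match website_socials with | some l => if l.isEmpty then r else r ++ l | none => r
  let r := match maps_socials with | some l => if l.isEmpty then r else r ++ l | none => r
  let r := match company_linkedin with | some s => if s == "" then r else r ++ [s] | none => r
  personnel.foldl (fun r p =>
    match (PySem.Dict.mk p).get? "profile_url" with
    | some u => if u == "" then r else r ++ [u]
    | none => r) r

-- shared helper: the normalization line is textually identical in A and in B.
-- rstrip("/") is ported by hand (exact for this one-char strip set): drop trailing '/' chars.
def pvNormKey (url : String) : String :=
  String.ofList (((PySem.Str.replace (PySem.Str.replace (PySem.Str.replace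
      (PySem.Str.lower url) "https://" "") "http://" "") "www." "").toList.reverse.dropWhile
      (fun c => c == '/')).reverse)

def aggregate_socials_py (website_socials : Option (List String)) (company_linkedin : Option String) (personnel : List (List (String × String))) (maps_socials : Option (List String)) : List String :=
  let raw_list := pvRawList website_socials company_linkedin personnel maps_socials
  let unique_map := raw_list.foldl (fun (d : PySem.Dict String String) url =>
    if url == "" then d
    else
      let clean_key := pvNormKey url
      if !(d.contains clean_key) then d.insert clean_key url
      else
        let current := d.getD clean_key ""   -- key present, default never used
        if PySem.Str.isIn "https" url && !(PySem.Str.isIn "https" current) then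
          d.insert clean_key url
        else d) PySem.Dict.empty
  PySem.List.sorted unique_map.values (fun x => x) false

-- ===== PORT B =====
-- next((u for u in g if "https" in u), g[0]); groups are never empty so headD's default is never used
def pvSelect (g : List String) : String :=
  (g.find? (fun u => PySem.Str.isIn "https" u)).getD (g.headD "")

def aggregate_socials_py_alt (website_socials : Option (List String)) (company_linkedin : Option String) (personnel : List (List (String × String))) (maps_socials : Option (List String)) : List String :=
  let raw_list := pvRawList website_socials company_linkedin personnel maps_socials
  let groups := raw_list.foldl (fun (d : PySem.Dict String (List String)) url =>
    if url == "" then d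
    else d.modify (pvNormKey url) [] (fun g => g ++ [url])) PySem.Dict.empty
  let chosen := groups.values.map pvSelect
  PySem.List.sorted chosen (fun x => x) false

-- ===== PRECONDITION & SPEC =====
def Spec_aggregate_socials_py (website_socials : Option (List String)) (company_linkedin : Option String) (personnel : List (List (String × String))) (maps_socials : Option (List String)) (out : List String) : Prop := out = aggregate_socials_py_alt website_socials company_linkedin personnel maps_socials
instance (website_socials : Option (List String)) (company_linkedin : Option String) (personnel : List (List (String × String))) (maps_socials : Option (List String)) (out : List String) : Decidable (Spec_aggregate_socials_py website_socials company_linkedin personnel maps_socials out) := by unfold Spec_aggregate_socials_py; infer_instance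

-- ===== CLAIM (what is proved, stated in full; the proofs are below) =====
def Claim_equal_aggregate_socials_py : Prop := ∀ (website_socials : Option (List String)) (company_linkedin : Option String) (personnel : List (List (String × String))) (maps_socials : Option (List String)), Dom_aggregate_socials_py website_socials company_linkedin personnel maps_socials → Spec_aggregate_socials_py website_socials company_linkedin personnel maps_socials (aggregate_socials_py website_socials company_linkedin personnel maps_socials)

-- ===== LEMMAS AND PROOFS =====

lemma pvSelect_singleton (url : String) : pvSelect [url] = url := by
  unfold pvSelect
  cases h : PySem.Str.isIn "https" url with
  | true => rw [List.find?_cons_of_pos h]; rfl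
  | false => rw [List.find?_cons_of_neg (by rw [h]; exact Bool.false_ne_true)]; rfl

lemma pvSelect_append (g : List String) (hg : g ≠ []) (url : String) :
    pvSelect (g ++ [url]) =
      if PySem.Str.isIn "https" url && !(PySem.Str.isIn "https" (pvSelect g)) then url
      else pvSelect g := by
  have hheadapp : (g ++ [url]).headD "" = g.headD "" := by
    cases g with
    | nil => exact absurd rfl hg
    | cons a t => rfl
  unfold pvSelect
  rw [List.find?_append]
  cases hf : g.find? (fun u => PySem.Str.isIn "https" u) with
  | some v =>
    have hv : PySem.Str.isIn "https" v = true := List.find?_some hf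
    rw [Option.some_or]
    simp only [Option.getD_some]
    rw [hv, Bool.not_true, Bool.and_false, if_neg Bool.false_ne_true]
  | none =>
    have hhead : PySem.Str.isIn "https" (g.headD "") = false := by
      have hmem : g.headD "" ∈ g := by
        cases g with
        | nil => exact absurd rfl hg
        | cons a t => exact List.mem_cons_self
      have := List.find?_eq_none.mp hf _ hmem
      exact Bool.not_eq_true _ ▸ (by simpa using this)
    rw [Option.none_or, Option.getD_none, hhead, Bool.not_false, Bool.and_true]
    cases hu : PySem.Str.isIn "https" url with
    | true =>
      rw [List.find?_cons_of_pos hu, Option.getD_some, if_pos rfl]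
    | false =>
      rw [List.find?_cons_of_neg (by rw [hu]; exact Bool.false_ne_true), List.find?_nil,
        Option.getD_none, hheadapp, if_neg Bool.false_ne_true]

-- the two dedupe loops, lifted to top level for the invariant proof
def pvStepA (d : PySem.Dict String String) (url : String) : PySem.Dict String String :=
  if url == "" then d
  else if !(d.contains (pvNormKey url)) then d.insert (pvNormKey url) url
  else if PySem.Str.isIn "https" url && !(PySem.Str.isIn "https" (d.getD (pvNormKey url) "")) then
    d.insert (pvNormKey url) url
  else d

def pvStepB (e : PySem.Dict String (List String)) (url : String) : PySem.Dict String (List String) :=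
  if url == "" then e
  else e.modify (pvNormKey url) [] (fun g => g ++ [url])

lemma pv_mem_items_eq {e : PySem.Dict String (List String)} {k : String} {g g' : List String}
    (hnd : e.keys.Nodup) (h1 : (k, g) ∈ e.items) (h2 : (k, g') ∈ e.items) : g = g' := by
  have a1 := PySem.Dict.get?_of_mem_items e h1 hnd
  have a2 := PySem.Dict.get?_of_mem_items e h2 hnd
  rw [a1] at a2; exact Option.some.inj a2

set_option maxHeartbeats 1000000 in
lemma pv_invariant (l : List String) (d : PySem.Dict String String)
    (e : PySem.Dict String (List String))
    (hitems : d.items = e.items.map (fun p => (p.1, pvSelect p.2)))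
    (hne : ∀ p ∈ e.items, p.2 ≠ [])
    (hnd : e.keys.Nodup) :
    (l.foldl pvStepA d).items =
      ((l.foldl pvStepB e).items.map (fun p => (p.1, pvSelect p.2))) ∧
    (∀ p ∈ (l.foldl pvStepB e).items, p.2 ≠ []) ∧
    (l.foldl pvStepB e).keys.Nodup := by
  induction l generalizing d e with
  | nil => exact ⟨hitems, hne, hnd⟩
  | cons url t ih =>
    simp only [List.foldl_cons]
    have hkeys : d.keys = e.keys := by
      simp only [PySem.Dict.keys, hitems, List.map_map]; rfl
    by_cases hurl : url = ""
    · subst hurl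
      have hA : pvStepA d "" = d := by
        unfold pvStepA; rw [if_pos (show (("" : String) == "") = true by decide)]
      have hB : pvStepB e "" = e := by
        unfold pvStepB; rw [if_pos (show (("" : String) == "") = true by decide)]
      rw [hA, hB]; exact ih d e hitems hne hnd
    · have hurlb : (url == "") = false := by simp [hurl]
      have hcont : d.contains (pvNormKey url) = e.contains (pvNormKey url) := by
        rw [PySem.Dict.contains_eq_decide_mem_keys, PySem.Dict.contains_eq_decide_mem_keys, hkeys]
      by_cases hc : e.contains (pvNormKey url) = true
      · -- existing key: A maybe upgrades, B appends to the group
        obtain ⟨g, hg⟩ : ∃ g, (pvNormKey url, g) ∈ e.items := by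
          have hk : pvNormKey url ∈ e.keys := (PySem.Dict.contains_iff_mem_keys e _).mp hc
          simp only [PySem.Dict.keys, List.mem_map] at hk
          obtain ⟨p, hp, hp1⟩ := hk
          exact ⟨p.2, by rw [← hp1]; simpa using hp⟩
        have hgne : g ≠ [] := hne _ hg
        have hgetB : e.getD (pvNormKey url) [] = g :=
          PySem.Dict.getD_of_get?_eq_some e [] (PySem.Dict.get?_of_mem_items e hg hnd)
        have hdnd : d.keys.Nodup := by rw [hkeys]; exact hnd
        have hgetA : d.getD (pvNormKey url) "" = pvSelect g := by
          have hmem : (pvNormKey url, pvSelect g) ∈ d.items := by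
            rw [hitems]; exact List.mem_map.mpr ⟨_, hg, rfl⟩
          exact PySem.Dict.getD_of_get?_eq_some d "" (PySem.Dict.get?_of_mem_items d hmem hdnd)
        have hdc : d.contains (pvNormKey url) = true := by rw [hcont]; exact hc
        have hB : pvStepB e url = e.insert (pvNormKey url) (g ++ [url]) := by
          unfold pvStepB
          rw [hurlb, if_neg Bool.false_ne_true, PySem.Dict.modify, hgetB]
        have hBitems : (pvStepB e url).items =
            e.items.map (fun p => if (p.1 == pvNormKey url) = true then (pvNormKey url, g ++ [url]) else p) := by
          rw [hB]; exact PySem.Dict.items_insert_of_contains e _ hc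
        have hsel := pvSelect_append g hgne url
        have hNe' : ∀ p ∈ (pvStepB e url).items, p.2 ≠ [] := by
          intro p hp
          rw [hBitems] at hp
          obtain ⟨q, hq, hqp⟩ := List.mem_map.mp hp
          by_cases h1 : (q.1 == pvNormKey url) = true
          · rw [if_pos h1] at hqp; rw [← hqp]; simp
          · rw [if_neg h1] at hqp; rw [← hqp]; exact hne q hq
        have hNd' : (pvStepB e url).keys.Nodup := by
          rw [hB, PySem.Dict.keys_insert_of_contains e _ hc]; exact hnd
        have hItems' : (pvStepA d url).items =
            (pvStepB e url).items.map (fun p => (p.1, pvSelect p.2)) := by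
          rw [hBitems, List.map_map]
          by_cases hcnd : (PySem.Str.isIn "https" url && !(PySem.Str.isIn "https" (pvSelect g))) = true
          · -- A upgrades to url; the appended url is also B's new selection
            have hup : pvSelect (g ++ [url]) = url := by rw [hsel, if_pos hcnd]
            have hA : pvStepA d url = d.insert (pvNormKey url) url := by
              unfold pvStepA
              rw [hurlb, if_neg Bool.false_ne_true, hdc, Bool.not_true,
                if_neg Bool.false_ne_true, hgetA, if_pos hcnd]
            rw [hA, PySem.Dict.items_insert_of_contains d _ hdc, hitems, List.map_map]
            refine List.map_congr_left ?_
            intro p _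
            by_cases h1 : (p.1 == pvNormKey url) = true
            · have hp1 : p.1 = pvNormKey url := by simpa using h1
              simp [hp1, hup]
            · simp only [Function.comp_apply, if_neg h1]
          · -- A keeps the current value; the appended url does not change B's selection
            have hkeep : pvSelect (g ++ [url]) = pvSelect g := by rw [hsel, if_neg hcnd]
            have hA : pvStepA d url = d := by
              unfold pvStepA
              rw [hurlb, if_neg Bool.false_ne_true, hdc, Bool.not_true,
                if_neg Bool.false_ne_true, hgetA, if_neg hcnd]
            rw [hA, hitems]
            refine List.map_congr_left ?_
            intro p hp
            by_cases h1 : (p.1 == pvNormKey url) = true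
            · have hp1 : p.1 = pvNormKey url := by simpa using h1
              have hpg : p.2 = g := pv_mem_items_eq hnd (by rw [← hp1]; simpa using hp) hg
              simp [hp1, hpg, hkeep]
            · simp only [Function.comp_apply, if_neg h1]
        exact ih _ _ hItems' hNe' hNd'
      · -- fresh key: both append a new entry
        have hc' : e.contains (pvNormKey url) = false := by simpa using hc
        have hdc : d.contains (pvNormKey url) = false := by rw [hcont]; exact hc'
        have hA : pvStepA d url = d.insert (pvNormKey url) url := by
          unfold pvStepA
          rw [hurlb, if_neg Bool.false_ne_true, hdc, Bool.not_false, if_pos rfl]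
        have hB : pvStepB e url = e.insert (pvNormKey url) [url] := by
          unfold pvStepB
          rw [hurlb, if_neg Bool.false_ne_true, PySem.Dict.modify,
            PySem.Dict.getD_of_not_contains e [] hc', List.nil_append]
        have hItems' : (pvStepA d url).items =
            (pvStepB e url).items.map (fun p => (p.1, pvSelect p.2)) := by
          rw [hA, hB, PySem.Dict.items_insert_of_not_contains d _ hdc,
            PySem.Dict.items_insert_of_not_contains e _ hc', List.map_append, hitems]
          simp [pvSelect_singleton]
        have hNe' : ∀ p ∈ (pvStepB e url).items, p.2 ≠ [] := by
          intro p hp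
          rw [hB, PySem.Dict.items_insert_of_not_contains e _ hc'] at hp
          rcases List.mem_append.mp hp with h | h
          · exact hne p h
          · rw [List.mem_singleton] at h; rw [h]; simp
        have hNd' : (pvStepB e url).keys.Nodup := by
          rw [hB, PySem.Dict.keys_insert_of_not_contains e _ hc']
          have hnm : pvNormKey url ∉ e.keys := fun hmem =>
            by rw [(PySem.Dict.contains_iff_mem_keys e _).mpr hmem] at hc'; cases hc'
          rw [List.nodup_append]
          refine ⟨hnd, List.nodup_singleton _, ?_⟩
          intro a ha b hb
          simp only [List.mem_singleton] at hb
          exact fun hab => hnm ((hab.trans hb) ▸ ha)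
        exact ih _ _ hItems' hNe' hNd'

-- ===== VERDICT (by name: the statement is the Claim_ definition above) =====
theorem aggregate_socials_py_spec : Claim_equal_aggregate_socials_py := by
  intro website_socials company_linkedin personnel maps_socials _
  unfold Spec_aggregate_socials_py aggregate_socials_py aggregate_socials_py_alt
  have h := pv_invariant (pvRawList website_socials company_linkedin personnel maps_socials)
    PySem.Dict.empty PySem.Dict.empty (by rfl) (by intro p hp; cases hp)
    (by simp [PySem.Dict.keys, PySem.Dict.empty])
  have hvals : ((pvRawList website_socials company_linkedin personnel maps_socials).foldl pvStepA PySem.Dict.empty).values =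
      ((((pvRawList website_socials company_linkedin personnel maps_socials).foldl pvStepB PySem.Dict.empty).values).map pvSelect) := by
    simp only [PySem.Dict.values, h.1, List.map_map]; rfl
  show PySem.List.sorted ((pvRawList website_socials company_linkedin personnel maps_socials).foldl pvStepA PySem.Dict.empty).values (fun x => x) false =
    PySem.List.sorted ((((pvRawList website_socials company_linkedin personnel maps_socials).foldl pvStepB PySem.Dict.empty).values).map pvSelect) (fun x => x) false
  rw [hvals]
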